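-- pv_equiv track=rewrite | github.com/WendelDamasceno/analisador-complexidade-algoritmos | algoritmos_teste.py | algoritmo_cubico
-- ===== SOURCE A (Python) =====
-- from typing import List
--
-- def algoritmo_cubico(lista: List[int]) -> int:
--     resultado = 0
--     n = len(lista)
--     for i in range(n):
--         for j in range(n):
--             for k in range(n):
--                 resultado += lista[i % n] * lista[j % n] * lista[k % n]
--
--     return resultado % 1000000
-- ===== SOURCE B (Python) =====
-- from typing import List
--
-- def algoritmo_cubico(lista: List[int]) -> int:
--     # sum over all (i,j,k) of lista[i]*lista[j]*lista[k] is (sum(lista))**3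
--     return sum(lista) ** 3 % 1000000
-- ===== Notes on version B (the rewrite author's own statement) =====
-- stated objective: faster
-- what changed: The triple nested loop summing all products lista[i]*lista[j]*lista[k] is replaced by the closed form (sum(lista))**3 % 1000000.
import Mathlib
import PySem

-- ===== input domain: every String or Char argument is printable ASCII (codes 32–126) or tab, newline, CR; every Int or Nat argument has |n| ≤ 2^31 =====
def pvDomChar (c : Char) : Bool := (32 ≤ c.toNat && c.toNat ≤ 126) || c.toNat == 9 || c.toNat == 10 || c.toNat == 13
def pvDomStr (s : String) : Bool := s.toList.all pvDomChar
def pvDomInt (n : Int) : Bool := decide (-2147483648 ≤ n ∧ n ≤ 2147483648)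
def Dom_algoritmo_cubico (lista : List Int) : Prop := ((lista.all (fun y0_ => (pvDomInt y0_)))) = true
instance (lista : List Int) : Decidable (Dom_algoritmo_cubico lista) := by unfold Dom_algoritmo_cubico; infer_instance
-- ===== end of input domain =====

-- B replaces A's O(n^3) triple loop by the closed form (sum lista)^3 % 1000000 (asymptotically faster).


-- ===== PORT A =====
-- literal port of A's triple nested loop; lista[i % n] with 0 ≤ i < n is always in range,
-- so the total pyGetD (default never taken) is exact here
def algoritmo_cubico (lista : List Int) : Int :=
  let n : Int := PySem.List.len lista
  let resultado : Int :=
    (PySem.List.pyRange 0 n).foldl (fun r i =>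
      (PySem.List.pyRange 0 n).foldl (fun r j =>
        (PySem.List.pyRange 0 n).foldl (fun r k =>
          r + PySem.List.pyGetD lista (PySem.Int.mod i n) 0 *
              PySem.List.pyGetD lista (PySem.Int.mod j n) 0 *
              PySem.List.pyGetD lista (PySem.Int.mod k n) 0) r) r) 0
  PySem.Int.mod resultado 1000000

-- ===== PORT B =====
def algoritmo_cubico_alt (lista : List Int) : Int :=
  PySem.Int.mod (lista.sum ^ 3) 1000000

-- ===== PRECONDITION & SPEC =====
def Spec_algoritmo_cubico (lista : List Int) (out : Int) : Prop := out = algoritmo_cubico_alt lista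
instance (lista : List Int) (out : Int) : Decidable (Spec_algoritmo_cubico lista out) := by unfold Spec_algoritmo_cubico; infer_instance

-- ===== CLAIM (what is proved, stated in full; the proofs are below) =====
def Claim_equal_algoritmo_cubico : Prop := ∀ (lista : List Int), Dom_algoritmo_cubico lista → Spec_algoritmo_cubico lista (algoritmo_cubico lista)

-- ===== LEMMAS AND PROOFS =====

-- inside a loop over range(n), i % n = i
theorem pv_mod_self {i n : Int} (h0 : 0 ≤ i) (h1 : i < n) : PySem.Int.mod i n = i := by
  rw [PySem.Int.mod_eq_emod_of_pos (by omega)]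
  exact Int.emod_eq_of_lt h0 h1

-- the values read by any of the three loops are exactly the elements of lista
theorem pv_map_A (lista : List Int) :
    (PySem.List.pyRange 0 (PySem.List.len lista)).map
      (fun k => PySem.List.pyGetD lista (PySem.Int.mod k (PySem.List.len lista)) 0) = lista := by
  rw [List.map_congr_left (fun k hk => by
    rw [pv_mod_self (PySem.List.mem_pyRange_one.mp hk).1 (PySem.List.mem_pyRange_one.mp hk).2])]
  exact PySem.List.map_pyGetD_pyRange_zero lista 0

-- the innermost loop adds c * lista[k] over all k, i.e. c * sum lista
theorem pv_inner (lista : List Int) (c r : Int) :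
    (PySem.List.pyRange 0 (PySem.List.len lista)).foldl
      (fun r k => r + c * PySem.List.pyGetD lista (PySem.Int.mod k (PySem.List.len lista)) 0) r
    = r + c * lista.sum := by
  rw [PySem.List.foldl_add]
  have := pv_map_A lista
  rw [show (fun k => c * PySem.List.pyGetD lista (PySem.Int.mod k (PySem.List.len lista)) 0)
      = (fun k => c * (fun k => PySem.List.pyGetD lista (PySem.Int.mod k (PySem.List.len lista)) 0) k) from rfl,
    List.sum_map_mul_left, this]

theorem algoritmo_cubico_spec : Claim_equal_algoritmo_cubico := by
  intro lista _
  unfold Spec_algoritmo_cubico algoritmo_cubico algoritmo_cubico_alt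
  set n := PySem.List.len lista with hn
  set A : Int → Int := fun t => PySem.List.pyGetD lista (PySem.Int.mod t n) 0 with hA
  set s := lista.sum with hs
  dsimp only
  congr 1
  -- triple loop = s^3, collapsing one loop at a time with pv_inner
  have hmid : ∀ (i : Int) (r : Int),
      (PySem.List.pyRange 0 n).foldl (fun r j =>
        (PySem.List.pyRange 0 n).foldl (fun r k => r + A i * A j * A k) r) r
      = r + A i * s * s := by
    intro i r
    rw [PySem.List.foldl_congr_mem _ _ (fun r j => r + A i * A j * s) r
      (fun acc j _ => pv_inner lista (A i * A j) acc)]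
    have hfe : (fun (r j : Int) => r + A i * A j * s) = fun r j => r + (A i * s) * A j := by
      funext r j; ring
    rw [hfe, pv_inner lista (A i * s) r]
  rw [PySem.List.foldl_congr_mem _ _ (fun r i => r + A i * s * s) 0
      (fun acc i _ => hmid i acc)]
  have hfe : (fun (r i : Int) => r + A i * s * s) = fun r i => r + (s * s) * A i := by
    funext r i; ring
  rw [hfe, pv_inner lista (s * s) 0]
  ring
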